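-- pv_equiv track=rewrite | github.com/chipi/podcast_scraper | episode_processor.py | derive_media_extension
-- ===== SOURCE A (Python) =====
-- from typing import List, Optional
--
-- DEFAULT_MEDIA_EXTENSION = ".bin"
--
-- MEDIA_TYPE_EXTENSION_MAP = {
--     "mpeg": ".mp3",
--     "mp3": ".mp3",
--     "m4a": ".m4a",
--     "mp4": ".m4a",
--     "aac": ".m4a",
--     "ogg": ".ogg",
--     "oga": ".ogg",
--     "wav": ".wav",
--     "webm": ".webm",
-- }
--
-- MEDIA_URL_EXTENSION_FALLBACKS = (".mp3", ".m4a", ".mp4", ".aac", ".ogg", ".wav", ".webm")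
--
-- def derive_media_extension(media_type: Optional[str], media_url: str) -> str:
--     """Derive file extension for media file based on MIME type or URL.
--
--     Args:
--         media_type: MIME type of the media
--         media_url: URL of the media file
--
--     Returns:
--         File extension with leading dot (e.g., '.mp3')
--     """
--     ext = DEFAULT_MEDIA_EXTENSION
--     if media_type and "/" in media_type:
--         ext_guess = media_type.split("/", 1)[1].lower()
--         mapped_ext = MEDIA_TYPE_EXTENSION_MAP.get(ext_guess)
--         if mapped_ext:
--             return mapped_ext
--     low = media_url.lower()
--     for cand in MEDIA_URL_EXTENSION_FALLBACKS:
--         if low.endswith(cand):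
--             return cand
--     return ext
-- ===== SOURCE B (Python) =====
-- from typing import Optional
--
-- DEFAULT_MEDIA_EXTENSION = ".bin"
--
-- MEDIA_TYPE_EXTENSION_MAP = {
--     "mpeg": ".mp3",
--     "mp3": ".mp3",
--     "m4a": ".m4a",
--     "mp4": ".m4a",
--     "aac": ".m4a",
--     "ogg": ".ogg",
--     "oga": ".ogg",
--     "wav": ".wav",
--     "webm": ".webm",
-- }
--
-- MEDIA_URL_EXTENSION_SET = {".mp3", ".m4a", ".mp4", ".aac", ".ogg", ".wav", ".webm"}
--
-- def derive_media_extension(media_type: Optional[str], media_url: str) -> str: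
--     """Derive file extension for media file based on MIME type or URL."""
--     if media_type and "/" in media_type:
--         mapped_ext = MEDIA_TYPE_EXTENSION_MAP.get(media_type.split("/", 1)[1].lower())
--         if mapped_ext:
--             return mapped_ext
--     low = media_url.lower()
--     dot = low.rfind(".")
--     if dot != -1:
--         ext = low[dot:]
--         if ext in MEDIA_URL_EXTENSION_SET:
--             return ext
--     return DEFAULT_MEDIA_EXTENSION
-- ===== Notes on version B (the rewrite author's own statement) =====
-- stated objective: idiomatic
-- what changed: The URL fallback no longer scans the fixed tuple of candidate suffixes with endswith; B extracts the trailing dotted extension once via rfind('.') and slicing and does a single set-membership test.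
import Mathlib
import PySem

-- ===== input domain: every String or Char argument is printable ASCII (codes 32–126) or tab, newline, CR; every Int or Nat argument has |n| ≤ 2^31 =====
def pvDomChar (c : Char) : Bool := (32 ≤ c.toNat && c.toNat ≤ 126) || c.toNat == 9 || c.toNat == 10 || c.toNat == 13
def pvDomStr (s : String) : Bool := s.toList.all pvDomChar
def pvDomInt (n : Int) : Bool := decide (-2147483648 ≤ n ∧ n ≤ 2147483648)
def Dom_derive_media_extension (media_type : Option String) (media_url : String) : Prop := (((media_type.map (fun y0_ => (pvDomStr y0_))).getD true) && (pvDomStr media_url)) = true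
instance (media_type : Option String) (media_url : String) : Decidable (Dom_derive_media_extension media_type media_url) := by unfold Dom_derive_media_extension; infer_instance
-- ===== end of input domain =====

-- B replaces A's fixed scan over candidate suffixes with one rfind-based extraction of the
-- trailing dotted extension followed by a single set-membership test (objective: idiomatic).

-- ===== PORT A =====
-- shared module constants (textually identical in Source A and Source B)
def pvDefaultExt : String := ".bin"
def pvTypeMap : PySem.Dict String String := PySem.Dict.ofList
  [("mpeg", ".mp3"), ("mp3", ".mp3"), ("m4a", ".m4a"), ("mp4", ".m4a"), ("aac", ".m4a"),
   ("ogg", ".ogg"), ("oga", ".ogg"), ("wav", ".wav"), ("webm", ".webm")]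

-- the MIME branch, textually identical in Source A and Source B (ported once, used by both ports):
-- 'if media_type and "/" in media_type: mapped = MAP.get(media_type.split("/",1)[1].lower()); if mapped: return mapped'
-- (index [1] of the split always exists because '/' occurs in the string; pyGetD's default is unreachable)
def pvMimeHit (media_type : Option String) : Option String :=
  match media_type with
  | none => none
  | some t =>
    if t ≠ "" && PySem.Str.isIn "/" t then
      match pvTypeMap.get? (PySem.Str.lower (PySem.List.pyGetD ((PySem.Str.splitMax? t "/" 1).getD []) 1 "")) with
      | some m => if m ≠ "" then some m else none
      | none => none
    else none

def pvFallbacks : List String := [".mp3", ".m4a", ".mp4", ".aac", ".ogg", ".wav", ".webm"]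

-- 'for cand in MEDIA_URL_EXTENSION_FALLBACKS: if low.endswith(cand): return cand / return ext'
def pvScanA (low : String) : List String → String
  | [] => pvDefaultExt
  | c :: cs => if PySem.Str.endswith low c then c else pvScanA low cs

def derive_media_extension (media_type : Option String) (media_url : String) : String :=
  match pvMimeHit media_type with
  | some m => m
  | none => pvScanA (PySem.Str.lower media_url) pvFallbacks

-- ===== PORT B =====
def pvExtSet : PySem.Set String :=
  PySem.Set.ofList [".mp3", ".m4a", ".mp4", ".aac", ".ogg", ".wav", ".webm"]

def derive_media_extension_alt (media_type : Option String) (media_url : String) : String :=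
  match pvMimeHit media_type with
  | some m => m
  | none =>
    let low := PySem.Str.lower media_url
    let dot := PySem.Str.rfind low "."
    if dot ≠ -1 then
      let ext := PySem.Str.slice low (some dot) none
      if PySem.Set.contains pvExtSet ext then ext else pvDefaultExt
    else pvDefaultExt

-- ===== PRECONDITION & SPEC =====
def Spec_derive_media_extension (media_type : Option String) (media_url : String) (out : String) : Prop := out = derive_media_extension_alt media_type media_url
instance (media_type : Option String) (media_url : String) (out : String) : Decidable (Spec_derive_media_extension media_type media_url out) := by unfold Spec_derive_media_extension; infer_instance

-- ===== CLAIM (what is proved, stated in full; the proofs are below) =====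
def Claim_equal_derive_media_extension : Prop := ∀ (media_type : Option String) (media_url : String), Dom_derive_media_extension media_type media_url → Spec_derive_media_extension media_type media_url (derive_media_extension media_type media_url)

-- ===== LEMMAS AND PROOFS =====

-- '.'-at-index-j reformulation of the prefix test inside rfind.go
theorem pv_prefix_dot (xs : List Char) : (['.'].isPrefixOf xs = true) ↔ xs[0]? = some '.' := by
  cases xs with
  | nil => simp [List.isPrefixOf]
  | cons a t =>
    simp [List.isPrefixOf]
    exact eq_comm

-- full characterisation of rfind.go for the single-character needle '.'
theorem pv_go_cases (L : List Char) (n : Nat) :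
    (PySem.Chars.rfind.go L ['.'] n = -1 ∧ ∀ j, j ≤ n → L[j]? ≠ some '.')
    ∨ (∃ i : Nat, PySem.Chars.rfind.go L ['.'] n = (i : Int) ∧ i ≤ n ∧ L[i]? = some '.'
        ∧ ∀ j, i < j → j ≤ n → L[j]? ≠ some '.') := by
  induction n with
  | zero =>
    by_cases h : ['.'].isPrefixOf L = true
    · right
      refine ⟨0, ?_, le_refl 0, ?_, ?_⟩
      · simp [PySem.Chars.rfind.go, h]
      · have := (pv_prefix_dot L).mp h; simpa using this
      · intro j hj hj0; omega
    · left
      constructor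
      · simp [PySem.Chars.rfind.go, h]
      · intro j hj; interval_cases j
        intro hc
        exact h ((pv_prefix_dot L).mpr (by simpa using hc))
  | succ k ih =>
    by_cases h : ['.'].isPrefixOf (L.drop (k + 1)) = true
    · right
      have hd : L[k + 1]? = some '.' := by
        have := (pv_prefix_dot (L.drop (k + 1))).mp h
        simpa [List.getElem?_drop] using this
      refine ⟨k + 1, ?_, le_refl _, hd, ?_⟩
      · simp [PySem.Chars.rfind.go, h]
      · intro j hj hj'; omega
    · have hnd : L[k + 1]? ≠ some '.' := by
        intro hc
        exact h ((pv_prefix_dot (L.drop (k + 1))).mpr (by simpa [List.getElem?_drop] using hc))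
      have hgo : PySem.Chars.rfind.go L ['.'] (k + 1) = PySem.Chars.rfind.go L ['.'] k := by
        simp [PySem.Chars.rfind.go, h]
      rcases ih with ⟨h1, h2⟩ | ⟨i, h1, h2, h3, h4⟩
      · left
        refine ⟨by rw [hgo]; exact h1, ?_⟩
        intro j hj
        rcases Nat.lt_or_ge j (k + 1) with hlt | hge
        · exact h2 j (by omega)
        · have : j = k + 1 := by omega
          simpa [this] using hnd
      · right
        refine ⟨i, by rw [hgo]; exact h1, by omega, h3, ?_⟩
        intro j hji hj
        rcases Nat.lt_or_ge j (k + 1) with hlt | hge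
        · exact h4 j hji (by omega)
        · have : j = k + 1 := by omega
          simpa [this] using hnd

-- rfind over '.' returns -1 or a nonnegative index
theorem pv_rfind_range (L : List Char) :
    PySem.Chars.rfind L ['.'] = -1 ∨ 0 ≤ PySem.Chars.rfind L ['.'] := by
  rcases pv_go_cases L L.length with ⟨h, _⟩ | ⟨i, h, _⟩
  · exact Or.inl (by simpa [PySem.Chars.rfind] using h)
  · right; rw [PySem.Chars.rfind, h]; exact Int.natCast_nonneg i

-- rfind locates the LAST dot: on p ++ '.'::r with r dot-free it returns p.length
theorem pv_rfind_last (p r : List Char) (hr : '.' ∉ r) :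
    PySem.Chars.rfind (p ++ '.' :: r) ['.'] = (p.length : Int) := by
  set L := p ++ '.' :: r with hL
  have hdot : L[p.length]? = some '.' := by
    rw [hL, List.getElem?_append_right (le_refl p.length)]
    simp
  have hplen : p.length ≤ L.length := by rw [hL]; simp
  rcases pv_go_cases L L.length with ⟨_, h2⟩ | ⟨i, h1, _, h3, h4⟩
  · exact absurd hdot (h2 p.length hplen)
  · have hi : i = p.length := by
      rcases Nat.lt_trichotomy i p.length with hlt | heq | hgt
      · exact absurd hdot (h4 p.length hlt hplen)
      · exact heq
      · exfalso
        have : L[i]? = r[i - p.length - 1]? := by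
          rw [hL, List.getElem?_append_right (by omega)]
          have h5 : i - p.length = (i - p.length - 1) + 1 := by omega
          rw [h5]
          simp
        rw [this] at h3
        exact hr (List.mem_of_getElem? h3)
    rw [PySem.Chars.rfind, h1, hi]

-- if a '.'-led, otherwise dot-free candidate is a suffix of L, rfind lands exactly on its dot
theorem pv_suffix_drop (L c : List Char) (r : List Char) (hc : c = '.' :: r) (hr : '.' ∉ r)
    (hs : c <:+ L) :
    0 ≤ PySem.Chars.rfind L ['.'] ∧ L.drop (PySem.Chars.rfind L ['.']).toNat = c := by
  rcases hs with ⟨p, hp⟩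
  subst hc
  have h := pv_rfind_last p r hr
  rw [← hp, h]
  refine ⟨Int.natCast_nonneg p.length, ?_⟩
  simp

-- candidate shape: every fallback is '.' followed by a dot-free tail
def pvShape (c : String) : Prop := ∃ r : List Char, c.toList = '.' :: r ∧ '.' ∉ r

-- A's scan returns the default when rfind finds no dot
theorem pv_scan_bin (low : String) (hn : PySem.Chars.rfind low.toList ['.'] = -1)
    (cs : List String) (hshape : ∀ c ∈ cs, pvShape c) :
    pvScanA low cs = pvDefaultExt := by
  induction cs with
  | nil => rfl
  | cons c cs ih =>
    have hsh := hshape c (List.mem_cons_self)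
    rcases hsh with ⟨r, hc, hr⟩
    have hE : PySem.Str.endswith low c = false := by
      by_contra h
      have h' : PySem.Chars.endswith low.toList c.toList = true := by
        rw [← PySem.Str.endswith_eq]; simpa using h
      have hs := (PySem.Chars.endswith_iff _ _).mp h'
      have := (pv_suffix_drop low.toList c.toList r hc hr hs).1
      omega
    simp only [pvScanA, hE]
    exact ih (fun x hx => hshape x (List.mem_cons_of_mem _ hx))

-- A's scan agrees with "extract the suffix at the last dot, test membership"
theorem pv_scan_eq (low ext : String)
    (hext : ext.toList = low.toList.drop (PySem.Chars.rfind low.toList ['.']).toNat)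
    (cs : List String) (hshape : ∀ c ∈ cs, pvShape c) :
    pvScanA low cs = if ext ∈ cs then ext else pvDefaultExt := by
  induction cs with
  | nil => rfl
  | cons c cs ih =>
    rcases hshape c (List.mem_cons_self) with ⟨r, hc, hr⟩
    by_cases hE : PySem.Str.endswith low c = true
    · have h' : PySem.Chars.endswith low.toList c.toList = true := by
        rw [← PySem.Str.endswith_eq]; exact hE
      have hs := (PySem.Chars.endswith_iff _ _).mp h'
      have hd := (pv_suffix_drop low.toList c.toList r hc hr hs).2
      have hec : ext = c := String.toList_inj.mp (by rw [hext, hd])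
      rw [pvScanA, if_pos hE, hec]
      simp
    · have hne : ext ≠ c := by
        intro h
        apply hE
        rw [PySem.Str.endswith_eq]
        apply (PySem.Chars.endswith_iff _ _).mpr
        rw [← h, hext]
        exact List.drop_suffix _ _
      rw [pvScanA, if_neg (by simpa using hE),
        ih (fun x hx => hshape x (List.mem_cons_of_mem _ hx))]
      simp [List.mem_cons, hne]

-- the two URL fallbacks agree for every lowered URL string
theorem pv_url_eq (low : String) :
    pvScanA low pvFallbacks =
      (if PySem.Str.rfind low "." ≠ -1 then
        (if PySem.Set.contains pvExtSet (PySem.Str.slice low (some (PySem.Str.rfind low ".")) none)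
          then PySem.Str.slice low (some (PySem.Str.rfind low ".")) none else pvDefaultExt)
      else pvDefaultExt) := by
  have hshape : ∀ c ∈ pvFallbacks, pvShape c := by
    intro c hc
    fin_cases hc
    · exact ⟨['m', 'p', '3'], by decide⟩
    · exact ⟨['m', '4', 'a'], by decide⟩
    · exact ⟨['m', 'p', '4'], by decide⟩
    · exact ⟨['a', 'a', 'c'], by decide⟩
    · exact ⟨['o', 'g', 'g'], by decide⟩
    · exact ⟨['w', 'a', 'v'], by decide⟩
    · exact ⟨['w', 'e', 'b', 'm'], by decide⟩
  have hrw : PySem.Str.rfind low "." = PySem.Chars.rfind low.toList ['.'] := by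
    simp
  rcases pv_rfind_range low.toList with hneg | hpos
  · rw [pv_scan_bin low hneg pvFallbacks hshape]
    rw [if_neg (by rw [hrw, hneg]; simp)]
  · set ext := PySem.Str.slice low (some (PySem.Str.rfind low ".")) none with hextdef
    have hext : ext.toList = low.toList.drop (PySem.Chars.rfind low.toList ['.']).toNat := by
      rw [hextdef, PySem.Str.toList_slice, PySem.Chars.slice_eq_listSlice, hrw]
      rw [show PySem.Chars.rfind low.toList ['.'] =
        ((PySem.Chars.rfind low.toList ['.']).toNat : Int) from (Int.toNat_of_nonneg hpos).symm]
      simp [pysem]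
    have h1 : PySem.Str.rfind low "." ≠ -1 := by rw [hrw]; omega
    rw [pv_scan_eq low ext hext pvFallbacks hshape]
    conv_rhs => rw [if_pos h1]
    have hset : (pvExtSet : List String) = pvFallbacks := by decide
    by_cases hin : ext ∈ pvFallbacks
    · simp [PySem.Set.contains, hset, hin]
    · simp [PySem.Set.contains, hset, hin]

-- ===== VERDICT (by name: the statement is the Claim_ definition above) =====
theorem derive_media_extension_spec : Claim_equal_derive_media_extension := by
  intro media_type media_url _
  unfold Spec_derive_media_extension derive_media_extension derive_media_extension_alt
  cases pvMimeHit media_type with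
  | some m => rfl
  | none => exact pv_url_eq (PySem.Str.lower media_url)
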